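-- pv_equiv track=rewrite | github.com/MrBrantCode/unitest_baseline | mut_generate/mist_train_taco/taco_8083/solution.py | calculate_total_values_sum
-- ===== SOURCE A (Python) =====
-- def calculate_total_values_sum(n, A):
--     MOD = 1000000007
--
--     def coeff(n):
--         a = pow(2, n, MOD)
--         res = [a - 1]
--         for i in range((n - 1) // 2):
--             a = a * 250000002 % MOD
--             res.append((res[-1] + (a - 1) * pow(2, i, MOD)) % MOD)
--         if n & 1:
--             return res + res[-2::-1]
--         return res + res[::-1]
--
--     coefficients = coeff(n)
--     result = sum(map(lambda x, y: x * y % MOD, coefficients, A)) % MOD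
--     return result
-- ===== SOURCE B (Python) =====
-- def calculate_total_values_sum(n, A):
--     MOD = 1000000007
--     # Closed form: for 1 <= n and 0 <= k < n the k-th coefficient of A's
--     # palindromic array is 3*2^(n-1) - 2^k - 2^(n-1-k)  (mod MOD), so no
--     # coefficient array is built at all: one pass with two running powers.
--     total = 0
--     m = min(n, len(A))
--     if m > 0:
--         hi = pow(2, n - 1, MOD)   # 2^(n-1-k) for the current k
--         t3 = 3 * hi               # 3 * 2^(n-1)
--         lo = 1                    # 2^k
--         inv2 = (MOD + 1) // 2     # modular inverse of 2
--         for k in range(m):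
--             total = (total + (t3 - lo - hi) % MOD * A[k]) % MOD
--             lo = lo * 2 % MOD
--             hi = hi * inv2 % MOD
--     return total
-- ===== Notes on version B (the rewrite author's own statement) =====
-- stated objective: faster
-- what changed: B derives the closed form 3*2^(n-1) - 2^k - 2^(n-1-k) (mod p) for the k-th coefficient, so it builds no coefficient array at all: instead of A's recurrence-built half-array (with a pow(2,i,MOD) call per step) mirrored into a full list and zipped with A, B runs one accumulation pass over A with two running powers of 2 and its inverse.
-- outside the precondition, e.g. on calculate_total_values_sum(-1, [3]): A returns 500000002, B returns 0; on calculate_total_values_sum(-2, [1, 1]): A returns 500000002, B returns 0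
import Mathlib
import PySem

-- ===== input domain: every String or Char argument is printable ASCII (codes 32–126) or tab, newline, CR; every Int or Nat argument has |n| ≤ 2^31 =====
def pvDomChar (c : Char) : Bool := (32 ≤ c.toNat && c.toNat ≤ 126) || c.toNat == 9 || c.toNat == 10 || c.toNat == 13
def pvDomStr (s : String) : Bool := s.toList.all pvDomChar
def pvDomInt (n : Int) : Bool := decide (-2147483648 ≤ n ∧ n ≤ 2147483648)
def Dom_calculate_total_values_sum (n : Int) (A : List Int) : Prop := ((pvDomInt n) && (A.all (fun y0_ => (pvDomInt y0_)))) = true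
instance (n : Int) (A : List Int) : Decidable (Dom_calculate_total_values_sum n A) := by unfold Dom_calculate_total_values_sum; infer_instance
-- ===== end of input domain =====

set_option maxRecDepth 4096


-- B replaces A's recurrence-built, mirrored coefficient array by the closed form
-- 3*2^(n-1) - 2^k - 2^(n-1-k) (mod p) for the k-th coefficient: one accumulation pass
-- with two running powers and no list at all (measurably faster, no per-step pow call).

-- pow(2, n, 1000000007) for an arbitrary Int n: for n < 0 Python uses the modular
-- inverse of 2 mod the prime 1000000007, which is 500000004 (exact for this modulus)
def pypow2mod (n : Int) : Int :=
  if 0 ≤ n then PySem.Int.powMod 2 n.toNat 1000000007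
  else PySem.Int.powMod 500000004 (-n).toNat 1000000007

-- ===== PORT A =====
-- loop body of A's coefficient loop: state = (a, res)
def stepA (st : Int × List Int) (i : Nat) : Int × List Int :=
  let a := PySem.Int.mod (st.1 * 250000002) 1000000007
  (a, st.2 ++ [PySem.Int.mod (st.2.getLast! + (a - 1) * PySem.Int.powMod 2 i 1000000007) 1000000007])

-- coeff(n): res[-2::-1] is res.dropLast.reverse and res[::-1] is res.reverse (exact);
-- `if n & 1` is truthy exactly when n % 2 == 1 (Python floor mod)
def coeffA (n : Int) : List Int :=
  let a := pypow2mod n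
  let st := (List.range ((PySem.Int.floordiv (n - 1) 2).toNat)).foldl stepA (a, [a - 1])
  let res := st.2
  if PySem.Int.mod n 2 = 1 then res ++ res.dropLast.reverse
  else res ++ res.reverse

-- sum(map(lambda x, y: x * y % MOD, coefficients, A)): map over two iterables truncates
-- at the shorter one, i.e. it is a zip (exact)
def calculate_total_values_sum (n : Int) (A : List Int) : Int :=
  let coefficients := coeffA n
  PySem.Int.mod
    (((coefficients.zip A).foldl
        (fun s p => s + PySem.Int.mod (p.1 * p.2) 1000000007) 0))
    1000000007

-- ===== PORT B =====
-- loop body of B's single pass: state = (total, lo, hi); A[k] has 0 ≤ k < m ≤ len(A),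
-- always in range, so it is ported with getD (exact)
def stepB (t3 inv2 : Int) (A : List Int) (st : Int × Int × Int) (k : Nat) : Int × Int × Int :=
  (PySem.Int.mod (st.1 + PySem.Int.mod (t3 - st.2.1 - st.2.2) 1000000007 * A.getD k 0) 1000000007,
   PySem.Int.mod (st.2.1 * 2) 1000000007,
   PySem.Int.mod (st.2.2 * inv2) 1000000007)

-- inside the branch 0 < m we have 1 ≤ n, so (n-1).toNat is exact for pow(2, n-1, MOD)
def calculate_total_values_sum_alt (n : Int) (A : List Int) : Int :=
  let m : Int := min n (A.length : Int)
  if 0 < m then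
    let hi0 := PySem.Int.powMod 2 (n - 1).toNat 1000000007
    let t3 := 3 * hi0
    let inv2 := PySem.Int.floordiv (1000000007 + 1) 2
    ((List.range m.toNat).foldl (stepB t3 inv2 A) (0, 1, hi0)).1
  else 0

-- ===== PRECONDITION & SPEC =====
-- Pre_ excludes negative n, on which the length of A's coefficient list (1 or 2,
-- independent of n) is an accident of the half-array construction while the task's n
-- is the number of coefficients; B naturally sums zero terms there, so neither value
-- is specified and they may differ.
def Pre_calculate_total_values_sum (n : Int) (A : List Int) : Prop := 0 ≤ n
instance (n : Int) (A : List Int) : Decidable (Pre_calculate_total_values_sum n A) := by unfold Pre_calculate_total_values_sum; infer_instance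

def pvWitness_calculate_total_values_sum : Int × List Int := (5, [1, 2, 3, 4, 5])

def Spec_calculate_total_values_sum (n : Int) (A : List Int) (out : Int) : Prop := out = calculate_total_values_sum_alt n A
instance (n : Int) (A : List Int) (out : Int) : Decidable (Spec_calculate_total_values_sum n A out) := by unfold Spec_calculate_total_values_sum; infer_instance

-- ===== CLAIM (what is proved, stated in full; the proofs are below) =====
def Claim_equal_calculate_total_values_sum : Prop := ∀ (n : Int) (A : List Int), Dom_calculate_total_values_sum n A → Pre_calculate_total_values_sum n A → Spec_calculate_total_values_sum n A (calculate_total_values_sum n A)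

-- ===== LEMMAS AND PROOFS =====

-- the residue field and the inverse of 2 in it
def wInv2 : ZMod 1000000007 := 500000004

theorem two_mul_wInv2 : (2 : ZMod 1000000007) * wInv2 = 1 := by decide

theorem cast_pymod (x : Int) :
    ((PySem.Int.mod x 1000000007 : Int) : ZMod 1000000007) = (x : ZMod 1000000007) := by
  rw [PySem.Int.mod_eq_emod_of_pos (by norm_num)]
  exact_mod_cast ZMod.intCast_mod x 1000000007

theorem cast_powMod2 (e : Nat) :
    ((PySem.Int.powMod 2 e 1000000007 : Int) : ZMod 1000000007) = 2 ^ e := by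
  rw [show PySem.Int.powMod 2 e 1000000007 = PySem.Int.mod (2 ^ e) 1000000007 from rfl,
    cast_pymod]
  push_cast
  ring

-- 2^nn * wInv2^b = 2^a whenever a + b = nn
theorem pow_pair (nn a b : Nat) (h : a + b = nn) :
    (2 : ZMod 1000000007) ^ nn * wInv2 ^ b = 2 ^ a := by
  subst h
  calc (2 : ZMod 1000000007) ^ (a + b) * wInv2 ^ b
      = 2 ^ a * ((2 * wInv2) ^ b) := by ring
    _ = 2 ^ a := by rw [two_mul_wInv2, one_pow, mul_one]

theorem getLast!_eq_getD (l : List Int) : l.getLast! = l.getD (l.length - 1) 0 := by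
  rw [List.getLast!_eq_getLast?_getD, List.getLast?_eq_getElem?, List.getD_eq_getElem?_getD,
    Int.default_eq_zero]

theorem resA_length (a0 : Int) (K : Nat) :
    ((List.range K).foldl stepA (a0, [a0 - 1])).2.length = K + 1 := by
  induction K with
  | zero => simp
  | succ K ih => rw [List.range_succ, List.foldl_append]; simp [stepA, ih]

theorem fstA_cast (a0 : Int) (nn : Nat) (ha : (a0 : ZMod 1000000007) = 2 ^ nn) (K : Nat) :
    ((((List.range K).foldl stepA (a0, [a0 - 1])).1 : Int) : ZMod 1000000007)
      = 2 ^ nn * (wInv2 * wInv2) ^ K := by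
  induction K with
  | zero => simpa using ha
  | succ K ih =>
    rw [List.range_succ, List.foldl_append]
    simp only [List.foldl_cons, List.foldl_nil, stepA]
    rw [cast_pymod, Int.cast_mul, ih]
    have h250 : ((250000002 : Int) : ZMod 1000000007) = wInv2 * wInv2 := by decide
    rw [h250]; ring

theorem resA_cast (a0 : Int) (nn : Nat) (ha : (a0 : ZMod 1000000007) = 2 ^ nn) (K : Nat) :
    ∀ k, k ≤ K → ((((List.range K).foldl stepA (a0, [a0 - 1])).2.getD k 0 : Int) : ZMod 1000000007)
      = 3 * 2 ^ nn * wInv2 - 2 ^ nn * wInv2 ^ (k + 1) - 2 ^ k := by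
  induction K with
  | zero =>
    intro k hk
    interval_cases k
    simp only [List.range_zero, List.foldl_nil, List.getD_cons_zero]
    have e1 : ((a0 - 1 : Int) : ZMod 1000000007) = 2 ^ nn * (2 * wInv2) - 1 := by
      push_cast [ha]; rw [two_mul_wInv2]; ring
    rw [e1]; ring
  | succ K ih =>
    intro k hk
    rw [List.range_succ, List.foldl_append]
    simp only [List.foldl_cons, List.foldl_nil, stepA]
    set st := (List.range K).foldl stepA (a0, [a0 - 1]) with hst
    have hlen : st.2.length = K + 1 := resA_length a0 K
    by_cases hkK : k ≤ K
    · rw [List.getD_append _ _ _ _ (by omega)]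
      exact ih k hkK
    · have hk1 : k = K + 1 := by omega
      subst hk1
      have hget : (st.2 ++ [PySem.Int.mod (st.2.getLast! +
          ((PySem.Int.mod (st.1 * 250000002) 1000000007) - 1) * PySem.Int.powMod 2 K 1000000007)
          1000000007]).getD (K + 1) 0
          = PySem.Int.mod (st.2.getLast! +
          ((PySem.Int.mod (st.1 * 250000002) 1000000007) - 1) * PySem.Int.powMod 2 K 1000000007)
          1000000007 := by
        rw [List.getD_eq_getElem?_getD, List.getElem?_append_right (by omega)]
        simp [hlen]
      rw [hget, cast_pymod]
      push_cast
      rw [cast_pymod, Int.cast_mul, fstA_cast a0 nn ha K, cast_powMod2]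
      have h250 : ((250000002 : Int) : ZMod 1000000007) = wInv2 * wInv2 := by decide
      rw [h250]
      have hlast : st.2.getLast! = st.2.getD K 0 := by
        rw [getLast!_eq_getD, hlen, Nat.add_sub_cancel]
      rw [hlast, ih K le_rfl]
      -- identity in ZMod p using 2*wInv2 = 1
      have hk1 : ((2 : ZMod 1000000007) * wInv2) ^ K = 1 := by rw [two_mul_wInv2, one_pow]
      have h2 : wInv2 ^ (K + 1) = 2 * wInv2 ^ (K + 2) := by
        calc wInv2 ^ (K + 1) = (2 * wInv2) * wInv2 ^ (K + 1) := by rw [two_mul_wInv2, one_mul]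
          _ = 2 * wInv2 ^ (K + 2) := by ring
      have h3 : (2 : ZMod 1000000007) ^ nn * ((wInv2 * wInv2) ^ K * (wInv2 * wInv2)) * 2 ^ K
          = 2 ^ nn * wInv2 ^ (K + 2) := by
        calc (2 : ZMod 1000000007) ^ nn * ((wInv2 * wInv2) ^ K * (wInv2 * wInv2)) * 2 ^ K
            = 2 ^ nn * wInv2 ^ (K + 2) * ((2 * wInv2) ^ K) := by ring
          _ = 2 ^ nn * wInv2 ^ (K + 2) := by rw [hk1, mul_one]
      linear_combination h3 - (2 : ZMod 1000000007) ^ nn * h2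

-- B's fold: bounds and residue characterisation of the state
theorem foldB_char (A : List Int) (t3 inv2 hi0 : Int)
    (hinv : ((inv2 : Int) : ZMod 1000000007) = wInv2) (j : Nat) :
    (0 ≤ ((List.range j).foldl (stepB t3 inv2 A) (0, 1, hi0)).1 ∧
      ((List.range j).foldl (stepB t3 inv2 A) (0, 1, hi0)).1 < 1000000007 ∨ j = 0) ∧
    ((((List.range j).foldl (stepB t3 inv2 A) (0, 1, hi0)).1 : Int) : ZMod 1000000007)
      = ∑ k ∈ Finset.range j,
          ((t3 : ZMod 1000000007) - 2 ^ k - (hi0 : ZMod 1000000007) * wInv2 ^ k)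
            * ((A.getD k 0 : Int) : ZMod 1000000007) ∧
    ((((List.range j).foldl (stepB t3 inv2 A) (0, 1, hi0)).2.1 : Int) : ZMod 1000000007) = 2 ^ j ∧
    ((((List.range j).foldl (stepB t3 inv2 A) (0, 1, hi0)).2.2 : Int) : ZMod 1000000007)
      = (hi0 : ZMod 1000000007) * wInv2 ^ j := by
  induction j with
  | zero => simp
  | succ j ih =>
    obtain ⟨_, hsum, hlo, hhi⟩ := ih
    rw [List.range_succ, List.foldl_append]
    simp only [List.foldl_cons, List.foldl_nil, stepB]
    refine ⟨Or.inl ⟨PySem.Int.mod_nonneg _ (by norm_num), PySem.Int.mod_lt _ (by norm_num)⟩, ?_, ?_, ?_⟩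
    · rw [cast_pymod, Finset.sum_range_succ, ← hsum]
      push_cast
      rw [cast_pymod]
      push_cast [hlo, hhi]
      ring
    · rw [cast_pymod]; push_cast [hlo]; ring
    · rw [cast_pymod]; push_cast [hhi, hinv]; ring

-- the Int foldl sum over a range, cast into the residue field
theorem cast_sum_range (f : Nat → Int) (M : Nat) :
    (((List.range M).foldl (fun s i => s + f i) 0 : Int) : ZMod 1000000007)
      = ∑ i ∈ Finset.range M, ((f i : Int) : ZMod 1000000007) := by
  induction M with
  | zero => simp
  | succ M ih => rw [List.range_succ, List.foldl_append, Finset.sum_range_succ, ← ih]; simp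

-- sum over a zip as a sum over indices (both Int-level foldl forms)
theorem foldzip_eq_foldrange (C A : List Int) (f : Int → Int → Int) :
    (C.zip A).foldl (fun s p => s + f p.1 p.2) 0
      = (List.range (min C.length A.length)).foldl (fun s i => s + f (C.getD i 0) (A.getD i 0)) 0 := by
  rw [PySem.List.foldl_add (C.zip A) (fun p : Int × Int => f p.1 p.2) 0,
      PySem.List.foldl_add (List.range (min C.length A.length))
        (fun i : Nat => f (C.getD i 0) (A.getD i 0)) 0]
  congr 1
  apply congrArg List.sum
  apply List.ext_getElem
  · simp [List.length_zip]
  · intro i h1 h2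
    simp only [List.getElem_map, List.getElem_zip, List.getElem_range]
    have hi : i < min C.length A.length := by simpa using h1
    rw [List.getD_eq_getElem C 0 (by omega), List.getD_eq_getElem A 0 (by omega)]

theorem mirror_getD_odd (res : List Int) (h1 : 1 ≤ res.length) (i : Nat)
    (hi : i < 2 * res.length - 1) :
    (res ++ res.dropLast.reverse).getD i 0
      = res.getD (if i < res.length then i else 2 * res.length - 2 - i) 0 := by
  by_cases h : i < res.length
  · rw [List.getD_append _ _ _ _ h, if_pos h]
  · rw [if_neg h]
    have hlt : i - res.length < res.dropLast.reverse.length := by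
      simp [List.length_dropLast]; omega
    rw [List.getD_eq_getElem?_getD, List.getD_eq_getElem?_getD,
        List.getElem?_append_right (by omega), List.getElem?_reverse (by simpa using hlt),
        List.getElem?_dropLast]
    have : res.dropLast.length - 1 - (i - res.length) = 2 * res.length - 2 - i := by
      simp [List.length_dropLast]; omega
    rw [this, if_pos (by omega)]

theorem mirror_getD_even (res : List Int) (i : Nat)
    (hi : i < 2 * res.length) :
    (res ++ res.reverse).getD i 0
      = res.getD (if i < res.length then i else 2 * res.length - 1 - i) 0 := by
  by_cases h : i < res.length
  · rw [List.getD_append _ _ _ _ h, if_pos h]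
  · rw [if_neg h]
    have hlt : i - res.length < res.length := by omega
    rw [List.getD_eq_getElem?_getD, List.getD_eq_getElem?_getD,
        List.getElem?_append_right (by omega), List.getElem?_reverse (by simpa using hlt)]
    have : res.length - 1 - (i - res.length) = 2 * res.length - 1 - i := by omega
    rw [this]

-- two canonical residues mod 1000000007 that agree in ZMod are equal as Ints
theorem int_eq_of_cast_eq (x y : Int) (hx0 : 0 ≤ x) (hx1 : x < 1000000007)
    (hy0 : 0 ≤ y) (hy1 : y < 1000000007)
    (h : (x : ZMod 1000000007) = (y : ZMod 1000000007)) : x = y := by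
  have := (ZMod.intCast_eq_intCast_iff' x y 1000000007).mp h
  rw [show ((1000000007 : Nat) : Int) = 1000000007 from by norm_num] at this
  rwa [Int.emod_eq_of_lt hx0 hx1, Int.emod_eq_of_lt hy0 hy1] at this

-- the two coefficient residues agree at every index j < nn (A's mirrored array vs B's closed form)
theorem coeff_residue (n : Int) (hn1 : 1 ≤ n) (j : Nat) (hj : j < n.toNat) :
    (((coeffA n).getD j 0 : Int) : ZMod 1000000007)
      = 3 * 2 ^ (n.toNat - 1) - 2 ^ j - 2 ^ (n.toNat - 1) * wInv2 ^ j := by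
  have hfd : PySem.Int.floordiv (n - 1) 2 = (n - 1) / 2 :=
    PySem.Int.floordiv_eq_ediv_of_pos (by norm_num)
  have hmod : PySem.Int.mod n 2 = n % 2 := PySem.Int.mod_eq_emod_of_pos (by norm_num)
  set nn := n.toNat with hnn
  have hn : (nn : Int) = n := Int.toNat_of_nonneg (by omega)
  rw [coeffA]
  set K := (PySem.Int.floordiv (n - 1) 2).toNat with hKdef
  have hK : (K : Int) = (n - 1) / 2 := by
    rw [hKdef, hfd]; exact Int.toNat_of_nonneg (by omega)
  have ha0 : ((pypow2mod n : Int) : ZMod 1000000007) = 2 ^ nn := by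
    rw [pypow2mod, if_pos (by omega : (0:Int) ≤ n), cast_powMod2]
  set a0 := pypow2mod n with ha0def
  have hlen : ((List.range K).foldl stepA (a0, [a0 - 1])).2.length = K + 1 := resA_length a0 K
  set res := ((List.range K).foldl stepA (a0, [a0 - 1])).2 with hres
  have h2w : (2 : ZMod 1000000007) ^ (nn - 1) = 2 ^ nn * wInv2 := by
    rw [← pow_pair nn (nn - 1) 1 (by omega), pow_one]
  have key : ∀ j', j' ≤ K → ((res.getD j' 0 : Int) : ZMod 1000000007)
      = 3 * 2 ^ nn * wInv2 - 2 ^ nn * wInv2 ^ (j' + 1) - 2 ^ j' :=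
    resA_cast a0 nn ha0 K
  by_cases hpar : PySem.Int.mod n 2 = 1
  · -- n odd: nn = 2K + 1
    have hodd : nn = 2 * K + 1 := by rw [hmod] at hpar; omega
    rw [if_pos hpar]
    rw [mirror_getD_odd res (by omega) j (by omega)]
    by_cases hjh : j < res.length
    · rw [if_pos hjh, key j (by omega)]
      rw [h2w]; ring
    · rw [if_neg hjh]
      have hj' : 2 * res.length - 2 - j = nn - 1 - j := by omega
      rw [hj', key (nn - 1 - j) (by omega)]
      have e1 : nn - 1 - j + 1 = nn - j := by omega
      rw [e1]
      rw [show (2 : ZMod 1000000007) ^ nn * wInv2 ^ (nn - j) = 2 ^ j from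
            pow_pair nn j (nn - j) (by omega),
          show (2 : ZMod 1000000007) ^ (nn - 1 - j) = 2 ^ nn * wInv2 ^ (j + 1) from
            (pow_pair nn (nn - 1 - j) (j + 1) (by omega)).symm,
          h2w]
      ring
  · -- n even: nn = 2K + 2
    have heven : nn = 2 * K + 2 := by rw [hmod] at hpar; omega
    rw [if_neg hpar]
    rw [mirror_getD_even res j (by omega)]
    by_cases hjh : j < res.length
    · rw [if_pos hjh, key j (by omega)]
      rw [h2w]; ring
    · rw [if_neg hjh]
      have hj' : 2 * res.length - 1 - j = nn - 1 - j := by omega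
      rw [hj', key (nn - 1 - j) (by omega)]
      have e1 : nn - 1 - j + 1 = nn - j := by omega
      rw [e1]
      rw [show (2 : ZMod 1000000007) ^ nn * wInv2 ^ (nn - j) = 2 ^ j from
            pow_pair nn j (nn - j) (by omega),
          show (2 : ZMod 1000000007) ^ (nn - 1 - j) = 2 ^ nn * wInv2 ^ (j + 1) from
            (pow_pair nn (nn - 1 - j) (j + 1) (by omega)).symm,
          h2w]
      ring

theorem coeffA_length (n : Int) (hn1 : 1 ≤ n) : (coeffA n).length = n.toNat := by
  have hfd : PySem.Int.floordiv (n - 1) 2 = (n - 1) / 2 :=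
    PySem.Int.floordiv_eq_ediv_of_pos (by norm_num)
  have hmod : PySem.Int.mod n 2 = n % 2 := PySem.Int.mod_eq_emod_of_pos (by norm_num)
  rw [coeffA]
  set K := (PySem.Int.floordiv (n - 1) 2).toNat with hKdef
  have hK : (K : Int) = (n - 1) / 2 := by
    rw [hKdef, hfd]; exact Int.toNat_of_nonneg (by omega)
  set a0 := pypow2mod n
  have hlen := resA_length a0 K
  by_cases hpar : PySem.Int.mod n 2 = 1
  · rw [if_pos hpar]
    rw [hmod] at hpar
    simp only [List.length_append, List.length_reverse, List.length_dropLast, hlen]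
    omega
  · rw [if_neg hpar]
    rw [hmod] at hpar
    simp only [List.length_append, List.length_reverse, hlen]
    omega

-- A returns 0 when the coefficient list is all zeros or the dot product is empty
theorem zipfold_zero (C A : List Int) (hC : ∀ x ∈ C, x = 0) :
    (C.zip A).foldl (fun s p => s + PySem.Int.mod (p.1 * p.2) 1000000007) 0 = 0 := by
  induction C generalizing A with
  | nil => simp
  | cons c C ih =>
    cases A with
    | nil => simp
    | cons a A =>
      simp only [List.zip_cons_cons, List.foldl_cons]
      rw [hC c (by simp), zero_mul,
        PySem.Int.mod_eq_emod_of_pos (by norm_num), Int.zero_emod, zero_add]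
      exact ih A (fun x hx => hC x (by simp [hx]))

-- ===== VERDICT (by name: the statement is the Claim_ definition above) =====
theorem calculate_total_values_sum_spec : Claim_equal_calculate_total_values_sum := by
  intro n A _ hpre
  have hpre' : (0 : Int) ≤ n := hpre
  show calculate_total_values_sum n A = calculate_total_values_sum_alt n A
  by_cases hm : 0 < min n ((A.length : Int))
  · -- main case: n ≥ 1 and A nonempty
    have hn1 : 1 ≤ n := by omega
    set nn := n.toNat with hnn
    have hn : (nn : Int) = n := Int.toNat_of_nonneg (by omega)
    -- B side
    simp only [calculate_total_values_sum_alt]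
    rw [if_pos hm]
    have hinv : ((PySem.Int.floordiv (1000000007 + 1) 2 : Int) : ZMod 1000000007) = wInv2 := by
      decide
    set m := min n ((A.length : Int)) with hmdef
    have hM : m.toNat = min nn A.length := by
      rcases le_total n ((A.length : Int)) with h | h
      · rw [hmdef, min_eq_left h, min_eq_left (by omega)]
      · rw [hmdef, min_eq_right h, min_eq_right (by omega)]; omega
    obtain ⟨hbnd, hsum, -, -⟩ := foldB_char A (3 * PySem.Int.powMod 2 (n - 1).toNat 1000000007)
      (PySem.Int.floordiv (1000000007 + 1) 2) (PySem.Int.powMod 2 (n - 1).toNat 1000000007)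
      hinv m.toNat
    have hj0 : m.toNat ≠ 0 := by omega
    rcases hbnd with hbnd | hbnd
    · -- A side
      simp only [calculate_total_values_sum]
      apply int_eq_of_cast_eq
      · exact PySem.Int.mod_nonneg _ (by norm_num)
      · exact PySem.Int.mod_lt _ (by norm_num)
      · exact hbnd.1
      · exact hbnd.2
      rw [cast_pymod, hsum]
      rw [foldzip_eq_foldrange (coeffA n) A (fun x y => PySem.Int.mod (x * y) 1000000007)]
      rw [cast_sum_range (fun i => PySem.Int.mod ((coeffA n).getD i 0 * A.getD i 0) 1000000007)]
      have hlen : min (coeffA n).length A.length = m.toNat := by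
        rw [coeffA_length n hn1, hM]
      rw [hlen]
      apply Finset.sum_congr rfl
      intro j hj
      have hjM : j < m.toNat := Finset.mem_range.mp hj
      rw [cast_pymod, Int.cast_mul]
      congr 1
      rw [coeff_residue n hn1 j (by omega)]
      have hhi : ((PySem.Int.powMod 2 (n - 1).toNat 1000000007 : Int) : ZMod 1000000007)
          = 2 ^ (nn - 1) := by
        rw [cast_powMod2, show (n - 1).toNat = nn - 1 by omega]
      push_cast
      rw [hhi]
    · exact absurd hbnd hj0
  · -- degenerate: n = 0 or A = []
    simp only [calculate_total_values_sum_alt, calculate_total_values_sum]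
    rw [if_neg hm]
    have hz : ((coeffA n).zip A).foldl
        (fun s p => s + PySem.Int.mod (p.1 * p.2) 1000000007) 0 = 0 := by
      by_cases hn0 : n = 0
      · subst hn0
        have hc : coeffA 0 = [0, 0] := by decide
        rw [hc]
        exact zipfold_zero [0, 0] A (by intro x hx; fin_cases hx <;> rfl)
      · have hA : A = [] := by
          cases A with
          | nil => rfl
          | cons a t => exfalso; simp at hm; omega
        rw [hA]; simp
    rw [hz]
    decide
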